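-- pv_equiv track=rewrite | github.com/Siddhant-Ray/Cross-Traffic-Flow-Maximization-in-L2L3-Networks | utils/generate_failures.py | _get_events_and_time
-- ===== SOURCE A (Python) =====
-- def _get_events_and_time(failure_spec):
--     events = {}
--     for failure in failure_spec:
--         edge, fail, duration = failure
--
--         if fail in events:
--             events[fail].append(('down', edge))
--         else:
--             events[fail] = [('down', edge)]
--
--         if fail+duration in events:
--             events[fail+duration].append(('up', edge))
--         else:
--             events[fail+duration] = [('up', edge)]
--
--     return sorted(events.items(), key=lambda x: x[0])
-- ===== SOURCE B (Python) =====
-- def _get_events_and_time(failure_spec):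
--     events = [ev for edge, fail, duration in failure_spec
--               for ev in ((fail, ('down', edge)), (fail + duration, ('up', edge)))]
--     times = sorted({t for t, _ in events})
--     return [(t, [p for tt, p in events if tt == t]) for t in times]
-- ===== Notes on version B (the rewrite author's own statement) =====
-- stated objective: simpler
-- what changed: Replaces the incrementally maintained dict of time-buckets with a flat event list built in one pass, whose distinct times are sorted and each bucket recovered by a filter comprehension.
import Mathlib
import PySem

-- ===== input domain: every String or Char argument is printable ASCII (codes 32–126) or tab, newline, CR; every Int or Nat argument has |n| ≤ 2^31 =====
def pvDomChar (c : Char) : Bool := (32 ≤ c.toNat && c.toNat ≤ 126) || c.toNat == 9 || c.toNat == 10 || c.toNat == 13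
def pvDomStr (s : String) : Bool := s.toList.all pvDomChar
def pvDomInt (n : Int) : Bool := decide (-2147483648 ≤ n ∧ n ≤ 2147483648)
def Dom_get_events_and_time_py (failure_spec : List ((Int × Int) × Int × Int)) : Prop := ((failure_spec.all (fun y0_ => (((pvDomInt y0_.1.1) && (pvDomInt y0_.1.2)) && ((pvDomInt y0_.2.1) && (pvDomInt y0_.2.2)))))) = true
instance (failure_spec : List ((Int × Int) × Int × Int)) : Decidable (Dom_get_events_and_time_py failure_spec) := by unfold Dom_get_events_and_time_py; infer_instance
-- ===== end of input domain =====

-- B replaces A's incrementally maintained dict of time-buckets by a flat event list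
-- whose distinct times are sorted and each bucket recovered by a filter (objective: simpler).

-- ===== PORT A =====
-- literal transliteration of A: a dict keyed by time, bucket lists appended in place,
-- then the items sorted by key.
def get_events_and_time_py (failure_spec : List ((Int × Int) × Int × Int)) : List (Int × (List (String × (Int × Int)))) :=
  let events : PySem.Dict Int (List (String × (Int × Int))) :=
    failure_spec.foldl (fun events failure =>
      let edge := failure.1
      let fail := failure.2.1
      let duration := failure.2.2
      let events :=
        if events.contains fail then
          events.modify fail ([] : List (String × (Int × Int))) (fun l => l ++ [("down", edge)])
        else
          events.insert fail [("down", edge)]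
      if events.contains (fail + duration) then
        events.modify (fail + duration) ([] : List (String × (Int × Int))) (fun l => l ++ [("up", edge)])
      else
        events.insert (fail + duration) [("up", edge)]) PySem.Dict.empty
  PySem.List.sorted events.items (fun x => x.1) false

-- ===== PORT B =====
-- literal transliteration of B (Source B): flat event list, sorted distinct times, filter per time.
def get_events_and_time_py_alt (failure_spec : List ((Int × Int) × Int × Int)) : List (Int × (List (String × (Int × Int)))) :=
  let events : List (Int × (String × (Int × Int))) :=
    failure_spec.flatMap (fun failure =>
      [(failure.2.1, ("down", failure.1)), (failure.2.1 + failure.2.2, ("up", failure.1))])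
  let times : List Int :=
    PySem.List.sorted (PySem.Set.ofList (events.map (fun e => e.1))) (fun x => x) false
  times.map (fun t => (t, (events.filter (fun e => e.1 == t)).map (fun e => e.2)))

-- ===== PRECONDITION & SPEC =====
def Spec_get_events_and_time_py (failure_spec : List ((Int × Int) × Int × Int)) (out : List (Int × (List (String × (Int × Int))))) : Prop := out = get_events_and_time_py_alt failure_spec
instance (failure_spec : List ((Int × Int) × Int × Int)) (out : List (Int × (List (String × (Int × Int))))) : Decidable (Spec_get_events_and_time_py failure_spec out) := by unfold Spec_get_events_and_time_py; infer_instance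

-- ===== CLAIM (what is proved, stated in full; the proofs are below) =====
def Claim_equal_get_events_and_time_py : Prop := ∀ (failure_spec : List ((Int × Int) × Int × Int)), Dom_get_events_and_time_py failure_spec → Spec_get_events_and_time_py failure_spec (get_events_and_time_py failure_spec)

-- ===== LEMMAS AND PROOFS =====

-- the flat event list of B
def pvFlat (failure_spec : List ((Int × Int) × Int × Int)) : List (Int × (String × (Int × Int))) :=
  failure_spec.flatMap (fun failure =>
    [(failure.2.1, ("down", failure.1)), (failure.2.1 + failure.2.2, ("up", failure.1))])

-- the one-event dict update, in modify form
def pvStep (d : PySem.Dict Int (List (String × (Int × Int)))) (p : Int × (String × (Int × Int))) :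
    PySem.Dict Int (List (String × (Int × Int))) :=
  d.modify p.1 [] (fun l => l ++ [p.2])

-- A's "if key present then append else create singleton" is exactly modify with default []
theorem pv_ifstep_eq_modify (d : PySem.Dict Int (List (String × (Int × Int)))) (k : Int)
    (v : String × (Int × Int)) :
    (if d.contains k then d.modify k [] (fun l => l ++ [v]) else d.insert k [v])
      = d.modify k [] (fun l => l ++ [v]) := by
  by_cases h : d.contains k = true
  · simp [h]
  · rw [if_neg (by simpa using h)]
    have h' : ∀ x, (k, x) ∉ d.items := by simpa [PySem.Dict.contains] using h
    have hany : (d.items.any fun p => p.1 == k) = false := by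
      rw [List.any_eq_false]
      rintro ⟨a, b⟩ hp
      simp only [beq_iff_eq]
      rintro rfl
      exact h' b hp
    have hfind : List.find? (fun p => p.1 == k) d.items = none := by
      apply List.find?_eq_none.2
      intro p hp
      exact List.any_eq_false.mp hany p hp
    simp [PySem.Dict.insert, PySem.Dict.modify, PySem.Dict.contains, PySem.Dict.getD,
      PySem.Dict.get?, hany, hfind]

-- A's per-failure dict update is the composition of the two one-event updates,
-- so the whole loop is a fold of pvStep over the flat event list
theorem pv_foldA_eq_foldFlat (failure_spec : List ((Int × Int) × Int × Int))
    (d : PySem.Dict Int (List (String × (Int × Int)))) :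
    failure_spec.foldl (fun events failure =>
      let edge := failure.1
      let fail := failure.2.1
      let duration := failure.2.2
      let events :=
        if events.contains fail then
          events.modify fail ([] : List (String × (Int × Int))) (fun l => l ++ [("down", edge)])
        else
          events.insert fail [("down", edge)]
      if events.contains (fail + duration) then
        events.modify (fail + duration) ([] : List (String × (Int × Int))) (fun l => l ++ [("up", edge)])
      else
        events.insert (fail + duration) [("up", edge)]) d
    = (pvFlat failure_spec).foldl pvStep d := by
  induction failure_spec generalizing d with
  | nil => rfl
  | cons f fs ih =>
    simp only [List.foldl_cons, pvFlat, List.flatMap_cons, List.foldl_append]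
    rw [← pvFlat]
    rw [ih]
    simp only [List.foldl_nil]
    rw [pv_ifstep_eq_modify, pv_ifstep_eq_modify]
    rfl

-- every lookup in the final dict is the filtered bucket of the flat event list
theorem pv_getD_fold (l : List (Int × (String × (Int × Int)))) (t : Int) :
    (l.foldl pvStep PySem.Dict.empty).getD t [] = (l.filter (fun e => e.1 == t)).map (fun e => e.2) := by
  unfold pvStep
  rw [PySem.Dict.getD_foldl_modify_append l PySem.Dict.empty t, PySem.Dict.getD_empty]
  simp

-- the final dict's keys are the distinct times, in first-occurrence order
theorem pv_keys_fold (l : List (Int × (String × (Int × Int)))) :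
    (l.foldl pvStep PySem.Dict.empty).keys = PySem.Set.ofList (l.map (fun e => e.1)) := by
  unfold pvStep
  rw [PySem.Dict.keys_foldl_modify_key l (fun p => p.1) [] (fun _ p => (fun xs => xs ++ [p.2])) PySem.Dict.empty]
  rw [PySem.Dict.keys_empty, PySem.Set.update_nil_left]

theorem pv_nodup_keys_fold (l : List (Int × (String × (Int × Int)))) :
    (l.foldl pvStep PySem.Dict.empty).keys.Nodup := by
  unfold pvStep
  exact PySem.Dict.nodup_keys_foldl_modify_key l (fun p => p.1) [] (fun _ p => (fun xs => xs ++ [p.2])) _ PySem.Dict.nodup_keys_empty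

-- ===== VERDICT (by name: the statement is the Claim_ definition above) =====
theorem get_events_and_time_py_spec : Claim_equal_get_events_and_time_py := by
  intro fs _
  unfold Spec_get_events_and_time_py get_events_and_time_py get_events_and_time_py_alt
  rw [pv_foldA_eq_foldFlat]
  show PySem.List.sorted ((pvFlat fs).foldl pvStep PySem.Dict.empty).items (fun x => x.1) false
    = List.map (fun t => (t, List.map (fun e => e.2) (List.filter (fun e => e.1 == t) (pvFlat fs))))
        (PySem.List.sorted (PySem.Set.ofList (List.map (fun e => e.1) (pvFlat fs))) (fun x => x) false)
  rw [PySem.Dict.items_eq_map_keys _ (pv_nodup_keys_fold (pvFlat fs)) []]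
  rw [pv_keys_fold]
  rw [List.map_congr_left (fun t _ => by rw [pv_getD_fold (pvFlat fs) t])]
  exact PySem.List.sorted_eq_of_perm_of_pairwise_lt _ _ _
    ((PySem.List.sorted_perm _ _ false).map _)
    (List.pairwise_map.2 (PySem.List.sorted_ofList_pairwise_lt _))
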